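-- pv_equiv track=rewrite | github.com/minjacho42/alogStudy | baekjoon/1759.py | solution
-- ===== SOURCE A (Python) =====
-- from itertools import combinations as comb
--
-- def solution(l, alpha):
--     answers = []
--     alphaList = sorted(list(alpha))
--     mo = sorted(list(alpha&set(['a','e','i','o','u'])))
--     ja = sorted(list(alpha-set(['a','e','i','o','u'])))
--     for j in range(2, l):
--         m = l - j
--         if m > len(mo) or j > len(ja):
--             continue
--         combMo = list(comb(mo,m))
--         combJa = list(comb(ja,j))
--         for cm in combMo:
--             for cj in combJa:
--                 answers.append(''.join(sorted(cm+cj)))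
--     return sorted(answers)
-- ===== SOURCE B (Python) =====
-- from itertools import combinations as comb
--
-- def solution(l, alpha):
--     vowels = {'a', 'e', 'i', 'o', 'u'}
--     if l < 3 or l > len(alpha):
--         return []
--     out = []
--     for c in comb(sorted(alpha), l):
--         v = sum(1 for x in c if x in vowels)
--         if v >= 1 and l - v >= 2:
--             out.append(''.join(c))
--     return sorted(out)
-- ===== Notes on version B (the rewrite author's own statement) =====
-- stated objective: simpler
-- what changed: Instead of looping over consonant counts and crossing per-count vowel-combinations with consonant-combinations, B makes one pass over the length-l combinations of the sorted alphabet and keeps those with at least one vowel and at least two consonants.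
import Mathlib
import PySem

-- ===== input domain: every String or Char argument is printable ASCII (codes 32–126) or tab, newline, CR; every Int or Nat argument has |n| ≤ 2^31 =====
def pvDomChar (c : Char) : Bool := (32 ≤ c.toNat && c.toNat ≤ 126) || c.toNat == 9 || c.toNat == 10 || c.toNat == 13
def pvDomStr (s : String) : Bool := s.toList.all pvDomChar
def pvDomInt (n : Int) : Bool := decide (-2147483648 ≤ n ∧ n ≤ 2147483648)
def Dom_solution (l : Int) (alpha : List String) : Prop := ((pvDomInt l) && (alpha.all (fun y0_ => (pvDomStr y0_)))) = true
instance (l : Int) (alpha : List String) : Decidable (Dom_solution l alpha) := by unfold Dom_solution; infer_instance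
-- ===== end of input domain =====

-- B replaces A's per-consonant-count cross products of vowel/consonant combinations by one filtered
-- pass over the length-l combinations of the sorted alphabet (objective: simpler).

-- ===== PORT A =====
-- the literal vowel set ['a','e','i','o','u'] of A
def pvVowels : List String := ["a", "e", "i", "o", "u"]

def solution (l : Int) (alpha : List String) : List String :=
  -- alpha is a Python set; its List String encoding holds the distinct elements (PySem.Set)
  let _alphaList := PySem.List.sorted alpha (fun x => x)   -- computed by A, never used
  let mo := PySem.List.sorted (PySem.Set.inter alpha (PySem.Set.ofList pvVowels)) (fun x => x)
  let ja := PySem.List.sorted (PySem.Set.diff alpha (PySem.Set.ofList pvVowels)) (fun x => x)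
  let answers := (PySem.List.pyRange 2 l).foldl (fun answers j =>
    let m := l - j
    if m > (mo.length : Int) ∨ j > (ja.length : Int) then answers
    else
      let combMo := PySem.List.combinations mo m.toNat
      let combJa := PySem.List.combinations ja j.toNat
      combMo.foldl (fun answers cm =>
        combJa.foldl (fun answers cj =>
          answers ++ [PySem.Str.join "" (PySem.List.sorted (cm ++ cj) (fun x => x))]) answers) answers) []
  PySem.List.sorted answers (fun x => x)

-- ===== PORT B =====
def solution_alt (l : Int) (alpha : List String) : List String :=
  let vowels := PySem.Set.ofList pvVowels
  if l < 3 ∨ l > (alpha.length : Int) then []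
  else
    let out := (PySem.List.combinations (PySem.List.sorted alpha (fun x => x)) l.toNat).foldl
      (fun out c =>
        -- sum(1 for x in c if x in vowels) = number of elements of c in vowels (exact)
        let v : Int := ((c.filter (fun x => PySem.Set.contains vowels x)).length : Int)
        if 1 ≤ v ∧ 2 ≤ l - v then out ++ [PySem.Str.join "" c] else out) []
    PySem.List.sorted out (fun x => x)

-- ===== PRECONDITION & SPEC =====
-- alpha is a Python set[str]: under the type convention its List String encoding holds DISTINCT
-- elements, so Pre_ states exactly that (it admits every set input; a duplicated list encodes no set).
def Pre_solution (l : Int) (alpha : List String) : Prop := alpha.Nodup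
instance (l : Int) (alpha : List String) : Decidable (Pre_solution l alpha) := by unfold Pre_solution; infer_instance
def pvWitness_solution : Int × List String := (4, ["a", "e", "b", "c", "d"])

def Spec_solution (l : Int) (alpha : List String) (out : List String) : Prop := out = solution_alt l alpha
instance (l : Int) (alpha : List String) (out : List String) : Decidable (Spec_solution l alpha out) := by unfold Spec_solution; infer_instance

-- ===== CLAIM (what is proved, stated in full; the proofs are below) =====
def Claim_equal_solution : Prop := ∀ (l : Int) (alpha : List String), Dom_solution l alpha → Pre_solution l alpha → Spec_solution l alpha (solution l alpha)

-- ===== LEMMAS AND PROOFS =====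

-- the vowel test, as both ports compute it
def pvP (x : String) : Bool := PySem.Set.contains (PySem.Set.ofList pvVowels) x

-- proof-side names for A's intermediate lists
def pvAL (alpha : List String) : List String := PySem.List.sorted alpha (fun x => x)
def pvMo (alpha : List String) : List String := (pvAL alpha).filter pvP
def pvJa (alpha : List String) : List String := (pvAL alpha).filter (fun a => !pvP a)
def pvG (cm cj : List String) : List String := PySem.List.sorted (cm ++ cj) (fun x => x)

def pvBody (l : Int) (alpha : List String) (j : Int) : List (List String) :=
  if l - j > ((pvMo alpha).length : Int) ∨ j > ((pvJa alpha).length : Int) then []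
  else (PySem.List.combinations (pvMo alpha) (l - j).toNat).flatMap
        (fun cm => (PySem.List.combinations (pvJa alpha) j.toNat).map (fun cj => pvG cm cj))

def pvLL (l : Int) (alpha : List String) : List (List String) :=
  (PySem.List.pyRange 2 l).flatMap (pvBody l alpha)

def pvRR (l : Int) (alpha : List String) : List (List String) :=
  (PySem.List.combinations (pvAL alpha) l.toNat).filter
    (fun c => decide (1 ≤ ((c.filter pvP).length : Int) ∧ 2 ≤ l - ((c.filter pvP).length : Int)))

-- loop shapes
theorem pv_foldl_ite_append {α β : Type} (p : α → Prop) [DecidablePred p] (h : α → List β)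
    (l : List α) (acc : List β) :
    l.foldl (fun acc x => if p x then acc else acc ++ h x) acc
      = acc ++ l.flatMap (fun x => if p x then [] else h x) := by
  induction l generalizing acc with
  | nil => simp
  | cons y ys ih => by_cases hy : p y <;> simp [hy, ih]

theorem pv_foldl_filter {α β : Type} (p : α → Prop) [DecidablePred p] (f : α → β)
    (l : List α) (acc : List β) :
    l.foldl (fun acc x => if p x then acc ++ [f x] else acc) acc
      = acc ++ (l.filter (fun x => decide (p x))).map f := by
  induction l generalizing acc with
  | nil => simp
  | cons y ys ih => by_cases hy : p y <;> simp [hy, ih]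

theorem pv_flatMap_singleton {α β : Type} (f : α → β) (l : List α) :
    l.flatMap (fun x => [f x]) = l.map f := by
  induction l with
  | nil => rfl
  | cons y ys ih => simp [ih]

-- combinations of a Nodup list form a Nodup list of lists
theorem pv_nodup_combinations {α : Type} :
    ∀ (xs : List α) (r : Nat), xs.Nodup → (PySem.List.combinations xs r).Nodup := by
  intro xs
  induction xs with
  | nil =>
    intro r _
    cases r with
    | zero => rw [PySem.List.combinations_zero]; exact List.nodup_singleton _
    | succ r => rw [PySem.List.combinations_nil_succ]; exact List.nodup_nil
  | cons x xs ih =>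
    intro r h
    cases r with
    | zero => rw [PySem.List.combinations_zero]; exact List.nodup_singleton _
    | succ r =>
      rw [PySem.List.combinations_cons_succ]
      rcases List.nodup_cons.mp h with ⟨hx, hxs⟩
      refine List.Nodup.append ?_ (ih _ hxs) ?_
      · exact List.Nodup.map (fun a b hab => by simpa using hab) (ih r hxs)
      · intro c hc1 hc2
        rw [List.mem_map] at hc1
        obtain ⟨c', _, rfl⟩ := hc1
        exact hx ((PySem.List.sublist_of_mem_combinations hc2).subset (List.mem_cons_self ..))

-- Pairwise (≤) + Nodup gives Pairwise (<) on strings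
theorem pv_pairwise_lt_of_le_nodup (xs : List String)
    (hle : xs.Pairwise (fun a b => a ≤ b)) (hnd : xs.Nodup) :
    xs.Pairwise (fun a b => a < b) :=
  (hle.and hnd).imp (fun hab => lt_of_le_of_ne hab.1 hab.2)

-- two ≤-sorted permuted string lists are equal
theorem pv_eq_of_perm_of_sorted (x y : List String) (hp : x.Perm y)
    (hx : x.Pairwise (fun a b => a ≤ b)) (hy : y.Pairwise (fun a b => a ≤ b)) : x = y :=
  List.Perm.eq_of_pairwise (fun _ _ _ _ h1 h2 => le_antisymm h1 h2) hx hy hp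

-- a strictly sorted subset of a strictly sorted list is a sublist
theorem pv_sublist_of_subset_sorted (x AL : List String) (hsub : x ⊆ AL)
    (hx : x.Pairwise (fun a b => a < b)) (hAL : AL.Pairwise (fun a b => a < b)) :
    x.Sublist AL := by
  have hnd : x.Nodup := hx.imp (fun hab => ne_of_lt hab)
  obtain ⟨x', hperm, hsl⟩ := hnd.subperm hsub
  have hx' : x'.Pairwise (fun a b => a < b) := List.Pairwise.sublist hsl hAL
  have hxx : x' = x :=
    List.Perm.eq_of_pairwise (fun _ _ _ _ h1 h2 => absurd h2 (lt_asymm h1)) hx' hx hperm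
  rwa [hxx] at hsl

-- the sorted merge of a vowel combination and a consonant combination, and its recovery
theorem pv_g_mem (alpha : List String) (h : alpha.Nodup) {cm cj : List String}
    (hcm : cm.Sublist (pvMo alpha)) (hcj : cj.Sublist (pvJa alpha)) :
    (pvG cm cj).Sublist (pvAL alpha) ∧ (pvG cm cj).length = cm.length + cj.length ∧
      (pvG cm cj).filter pvP = cm ∧ (pvG cm cj).filter (fun a => !pvP a) = cj := by
  have hALle : (pvAL alpha).Pairwise (fun a b => a ≤ b) :=
    PySem.List.sorted_pairwise alpha (fun x => x)
  have hALnd : (pvAL alpha).Nodup :=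
    ((PySem.List.sorted_perm alpha (fun x => x) false).nodup_iff).mpr h
  have hmole : (pvMo alpha).Pairwise (fun a b => a ≤ b) := hALle.filter _
  have hjale : (pvJa alpha).Pairwise (fun a b => a ≤ b) := hALle.filter _
  have hperm : (pvG cm cj).Perm (cm ++ cj) := PySem.List.sorted_perm (cm ++ cj) (fun x => x) false
  have hcmP : ∀ a ∈ cm, pvP a = true := by
    intro a ha
    have hmem : a ∈ pvMo alpha := hcm.subset ha
    unfold pvMo at hmem
    simpa using (List.mem_filter.mp hmem).2
  have hcjP : ∀ a ∈ cj, (!pvP a) = true := by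
    intro a ha
    have hmem : a ∈ pvJa alpha := hcj.subset ha
    unfold pvJa at hmem
    simpa using (List.mem_filter.mp hmem).2
  have hgle : (pvG cm cj).Pairwise (fun a b => a ≤ b) :=
    PySem.List.sorted_pairwise (cm ++ cj) (fun x => x)
  have hfP : (pvG cm cj).filter pvP = cm := by
    have h1 : ((pvG cm cj).filter pvP).Perm cm := by
      have hnil : List.filter pvP cj = [] :=
        List.filter_eq_nil_iff.mpr (fun a ha => by simpa using hcjP a ha)
      have h2 := hperm.filter pvP
      rwa [List.filter_append, List.filter_eq_self.mpr hcmP, hnil,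
           List.append_nil] at h2
    exact pv_eq_of_perm_of_sorted _ _ h1 (hgle.filter _) (List.Pairwise.sublist hcm hmole)
  have hfQ : (pvG cm cj).filter (fun a => !pvP a) = cj := by
    have h1 : ((pvG cm cj).filter (fun a => !pvP a)).Perm cj := by
      have hnil : List.filter (fun a => !pvP a) cm = [] :=
        List.filter_eq_nil_iff.mpr (fun a ha => by simpa using hcmP a ha)
      have h2 := hperm.filter (fun a => !pvP a)
      rwa [List.filter_append, hnil,
           List.filter_eq_self.mpr hcjP, List.nil_append] at h2
    exact pv_eq_of_perm_of_sorted _ _ h1 (hgle.filter _) (List.Pairwise.sublist hcj hjale)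
  have hnd : (pvG cm cj).Nodup := by
    rw [hperm.nodup_iff]
    refine List.Nodup.append (List.Nodup.sublist hcm (hALnd.filter _))
      (List.Nodup.sublist hcj (hALnd.filter _)) ?_
    intro a ha1 ha2
    have h1 := hcmP a ha1
    have h2 := hcjP a ha2
    simp [h1] at h2
  refine ⟨?_, ?_, hfP, hfQ⟩
  · refine pv_sublist_of_subset_sorted _ _ ?_ (pv_pairwise_lt_of_le_nodup _ hgle hnd)
      (pv_pairwise_lt_of_le_nodup _ hALle hALnd)
    intro a ha
    rcases List.mem_append.mp (hperm.subset ha) with h' | h'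
    · exact List.filter_sublist.subset (hcm.subset h')
    · exact List.filter_sublist.subset (hcj.subset h')
  · rw [hperm.length_eq, List.length_append]

theorem pv_body_mem (l : Int) (alpha : List String) (h : alpha.Nodup) {j : Int} {x : List String}
    (hx : x ∈ pvBody l alpha j) :
    x.Sublist (pvAL alpha) ∧ (x.filter pvP).length = (l - j).toNat ∧
      (x.filter (fun a => !pvP a)).length = j.toNat := by
  unfold pvBody at hx
  split at hx
  · simp at hx
  · simp only [List.mem_flatMap, List.mem_map, PySem.List.mem_combinations_iff] at hx
    obtain ⟨cm, ⟨hcmS, hcmL⟩, cj, ⟨hcjS, hcjL⟩, rfl⟩ := hx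
    obtain ⟨hsub, _, hfP, hfQ⟩ := pv_g_mem alpha h hcmS hcjS
    exact ⟨hsub, by rw [hfP, hcmL], by rw [hfQ, hcjL]⟩

theorem pv_nodup_LL (l : Int) (alpha : List String) (h : alpha.Nodup) : (pvLL l alpha).Nodup := by
  have hALnd : (pvAL alpha).Nodup :=
    ((PySem.List.sorted_perm alpha (fun x => x) false).nodup_iff).mpr h
  unfold pvLL
  rw [List.nodup_flatMap]
  constructor
  · intro j _
    unfold pvBody
    split
    · exact List.nodup_nil
    · rw [List.nodup_flatMap]
      constructor
      · intro cm hcm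
        rw [PySem.List.mem_combinations_iff] at hcm
        refine List.Nodup.map_on ?_ (pv_nodup_combinations _ _ (hALnd.filter _))
        intro c1 h1 c2 h2 heq
        rw [PySem.List.mem_combinations_iff] at h1 h2
        have e1 := (pv_g_mem alpha h hcm.1 h1.1).2.2.2
        have e2 := (pv_g_mem alpha h hcm.1 h2.1).2.2.2
        rw [← e1, ← e2, heq]
      · have hndc : List.Pairwise (fun a b : List String => a ≠ b)
            (PySem.List.combinations (pvMo alpha) (l - j).toNat) :=
          pv_nodup_combinations (pvMo alpha) _ (hALnd.filter _)
        refine hndc.imp_of_mem (fun {c1 c2} h1 h2 hne => ?_)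
        intro x hx1 hx2
        rw [PySem.List.mem_combinations_iff] at h1 h2
        rw [List.mem_map] at hx1 hx2
        obtain ⟨d1, hd1, rfl⟩ := hx1
        obtain ⟨d2, hd2, he⟩ := hx2
        rw [PySem.List.mem_combinations_iff] at hd1 hd2
        have e1 := (pv_g_mem alpha h h1.1 hd1.1).2.2.1
        have e2 := (pv_g_mem alpha h h2.1 hd2.1).2.2.1
        exact hne (by rw [← e1, ← he, e2])
  · have hndr : List.Pairwise (fun a b : Int => a ≠ b) (PySem.List.pyRange 2 l) := by
      rw [PySem.List.pyRange_one]
      exact List.Nodup.map (fun a b hab => by omega) List.nodup_range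
    refine hndr.imp_of_mem (fun {j1 j2} hj1 hj2 hne => ?_)
    intro x hx1 hx2
    have b1 := (pv_body_mem l alpha h hx1).2.2
    have b2 := (pv_body_mem l alpha h hx2).2.2
    rw [PySem.List.mem_pyRange_one] at hj1 hj2
    exact hne (by omega)

theorem pv_nodup_RR (l : Int) (alpha : List String) (h : alpha.Nodup) : (pvRR l alpha).Nodup := by
  have hALnd : (pvAL alpha).Nodup :=
    ((PySem.List.sorted_perm alpha (fun x => x) false).nodup_iff).mpr h
  exact List.Nodup.filter _ (pv_nodup_combinations _ _ hALnd)

theorem pv_mem_iff (l : Int) (alpha : List String) (h : alpha.Nodup) (hl3 : 3 ≤ l)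
    (x : List String) : x ∈ pvLL l alpha ↔ x ∈ pvRR l alpha := by
  have hALle : (pvAL alpha).Pairwise (fun a b => a ≤ b) :=
    PySem.List.sorted_pairwise alpha (fun x => x)
  unfold pvLL pvRR
  simp only [List.mem_flatMap, List.mem_filter, PySem.List.mem_combinations_iff,
    decide_eq_true_eq]
  constructor
  · rintro ⟨j, hj, hx⟩
    rw [PySem.List.mem_pyRange_one] at hj
    obtain ⟨hsub, hP, hQ⟩ := pv_body_mem l alpha h hx
    have hsum : (x.filter pvP).length + (x.filter (fun a => !pvP a)).length = x.length := by
      have hfl := (List.filter_append_perm pvP x).length_eq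
      rw [List.length_append] at hfl
      exact hfl
    refine ⟨⟨hsub, ?_⟩, ?_, ?_⟩ <;> omega
  · rintro ⟨⟨hsub, hxl⟩, hv1, hv2⟩
    have hcmS : (x.filter pvP).Sublist (pvMo alpha) := List.Sublist.filter pvP hsub
    have hcjS : (x.filter (fun a => !pvP a)).Sublist (pvJa alpha) :=
      List.Sublist.filter _ hsub
    have hsum : (x.filter pvP).length + (x.filter (fun a => !pvP a)).length = x.length := by
      have hfl := (List.filter_append_perm pvP x).length_eq
      rw [List.length_append] at hfl
      exact hfl
    have hmoL := hcmS.length_le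
    have hjaL := hcjS.length_le
    refine ⟨((x.filter (fun a => !pvP a)).length : Int), ?_, ?_⟩
    · rw [PySem.List.mem_pyRange_one]
      omega
    · unfold pvBody
      rw [if_neg (by push_neg; omega)]
      rw [List.mem_flatMap]
      refine ⟨x.filter pvP, ?_, ?_⟩
      · rw [PySem.List.mem_combinations_iff]
        exact ⟨hcmS, by omega⟩
      · rw [List.mem_map]
        refine ⟨x.filter (fun a => !pvP a), ?_, ?_⟩
        · rw [PySem.List.mem_combinations_iff]
          exact ⟨hcjS, by omega⟩
        · unfold pvG
          exact PySem.List.sorted_id_eq_of_perm_of_pairwise _ _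
            ((List.filter_append_perm pvP x).symm) (List.Pairwise.sublist hsub hALle)

theorem pv_LL_nil (l : Int) (alpha : List String) (hc : l < 3 ∨ l > (alpha.length : Int)) :
    pvLL l alpha = [] := by
  have hlen : (pvMo alpha).length + (pvJa alpha).length = alpha.length := by
    have h1 := (List.filter_append_perm pvP (pvAL alpha)).length_eq
    have h2 := (PySem.List.sorted_perm alpha (fun x => x) false).length_eq
    rw [List.length_append] at h1
    unfold pvMo pvJa
    unfold pvAL at *
    omega
  apply List.eq_nil_iff_forall_not_mem.mpr
  intro x hx
  unfold pvLL at hx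
  rw [List.mem_flatMap] at hx
  obtain ⟨j, hj, hxb⟩ := hx
  rw [PySem.List.mem_pyRange_one] at hj
  have hg : l - j > ((pvMo alpha).length : Int) ∨ j > ((pvJa alpha).length : Int) := by
    by_contra hgg
    push_neg at hgg
    omega
  unfold pvBody at hxb
  rw [if_pos hg] at hxb
  simp at hxb

theorem pv_A_eq (l : Int) (alpha : List String) :
    solution l alpha = PySem.List.sorted ((pvLL l alpha).map (PySem.Str.join "")) (fun x => x) := by
  have hint : PySem.Set.inter alpha (PySem.Set.ofList pvVowels) = alpha.filter pvP := by
    unfold pvP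
    simp [PySem.Set.inter]
  have hdiff : PySem.Set.diff alpha (PySem.Set.ofList pvVowels) = alpha.filter (fun a => !pvP a) := by
    unfold pvP
    simp [PySem.Set.diff]
  have hmo : PySem.List.sorted (PySem.Set.inter alpha (PySem.Set.ofList pvVowels)) (fun x => x)
      = pvMo alpha := by
    rw [hint]
    unfold pvMo
    exact PySem.List.sorted_id_eq_of_perm_of_pairwise _ _
      (List.Perm.filter _ (PySem.List.sorted_perm alpha (fun x => x) false))
      ((PySem.List.sorted_pairwise alpha (fun x => x)).filter _)
  have hja : PySem.List.sorted (PySem.Set.diff alpha (PySem.Set.ofList pvVowels)) (fun x => x)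
      = pvJa alpha := by
    rw [hdiff]
    unfold pvJa
    exact PySem.List.sorted_id_eq_of_perm_of_pairwise _ _
      (List.Perm.filter _ (PySem.List.sorted_perm alpha (fun x => x) false))
      ((PySem.List.sorted_pairwise alpha (fun x => x)).filter _)
  simp only [solution]
  simp only [PySem.List.foldl_append_eq_flatMap]
  rw [pv_foldl_ite_append, List.nil_append]
  simp only [hmo, hja]
  congr 1
  unfold pvLL
  rw [List.map_flatMap]
  congr 1
  funext j
  unfold pvBody
  by_cases hg : l - j > ((pvMo alpha).length : Int) ∨ j > ((pvJa alpha).length : Int)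
  · simp only [if_pos hg, List.map_nil]
  · simp only [if_neg hg]
    rw [List.map_flatMap]
    congr 1
    funext cm
    simp only [List.map_map, pv_flatMap_singleton]
    rfl

theorem pv_B_eq (l : Int) (alpha : List String) (hc : ¬(l < 3 ∨ l > (alpha.length : Int))) :
    solution_alt l alpha
      = PySem.List.sorted ((pvRR l alpha).map (PySem.Str.join "")) (fun x => x) := by
  simp only [solution_alt]
  rw [if_neg hc, pv_foldl_filter, List.nil_append]
  rfl

theorem pv_main (l : Int) (alpha : List String) (h : alpha.Nodup) :
    solution l alpha = solution_alt l alpha := by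
  by_cases hc : l < 3 ∨ l > (alpha.length : Int)
  · rw [pv_A_eq, pv_LL_nil l alpha hc]
    simp only [List.map_nil]
    unfold solution_alt
    rw [if_pos hc]
    exact (PySem.List.sorted_eq_nil_iff _ _ _).mpr rfl
  · rw [pv_A_eq, pv_B_eq l alpha hc]
    rw [PySem.List.sorted_id_eq_sorted_id_iff_perm]
    refine List.Perm.map _ ?_
    rw [List.perm_ext_iff_of_nodup (pv_nodup_LL l alpha h) (pv_nodup_RR l alpha h)]
    intro x
    exact pv_mem_iff l alpha h (by omega) x

-- ===== VERDICT (by name: the statement is the Claim_ definition above) =====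
theorem solution_spec : Claim_equal_solution := by
  intro l alpha _hd hpre
  unfold Spec_solution
  exact pv_main l alpha hpre
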